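-- pv_equiv track=rewrite | github.com/egondo/1tdspj_listas | jogatina/baralho.py | cria
-- ===== SOURCE A (Python) =====
-- def cria(tipo):
--     monte = []
--     for valor in range(1, 14):
--         monte.append( (valor, '♦') )
--         monte.append( (valor, '♥') )
--         monte.append( (valor, '♠') )
--         monte.append( (valor, '♣') )
--
--     if tipo == 'truco':
--         i = 0
--         while i < 12:
--             monte.pop(28)
--             i = i + 1
--         #for i in range(12):
--         #   monte.pop(32)
--     if tipo == '2macos':
--         monte = monte + monte
--
--     return monte
-- ===== SOURCE B (Python) =====
-- def cria(tipo):
--     suits = ('♦', '♥', '♠', '♣')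
--     skip = {8, 9, 10} if tipo == 'truco' else set()
--     monte = [(valor, s) for valor in range(1, 14) if valor not in skip for s in suits]
--     if tipo == '2macos':
--         monte = monte + monte
--     return monte
-- ===== Notes on version B (the rewrite author's own statement) =====
-- stated objective: simpler
-- what changed: B filters the values 8-10 during a single comprehension when tipo=='truco' instead of building the full 52-card deck and popping index 28 twelve times.
import Mathlib
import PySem

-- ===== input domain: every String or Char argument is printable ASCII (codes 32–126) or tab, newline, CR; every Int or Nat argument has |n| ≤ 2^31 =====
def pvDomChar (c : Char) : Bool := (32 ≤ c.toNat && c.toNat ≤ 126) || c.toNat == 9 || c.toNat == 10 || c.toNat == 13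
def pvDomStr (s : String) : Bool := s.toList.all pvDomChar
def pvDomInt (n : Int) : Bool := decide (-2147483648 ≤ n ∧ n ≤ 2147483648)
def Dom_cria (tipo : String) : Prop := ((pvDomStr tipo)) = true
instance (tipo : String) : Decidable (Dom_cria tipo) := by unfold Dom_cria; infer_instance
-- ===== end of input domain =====

set_option maxRecDepth 4000

-- B builds the deck in one filtered comprehension (skipping 8-10 for 'truco') instead of building 52 cards then popping index 28 twelve times; objective: simpler.


-- ===== PORT A =====
-- while i < 12: monte.pop(28) — pop? is always some on the 52-card deck A built
def criaPopLoop : Nat → List (Int × String) → List (Int × String)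
  | 0, m => m
  | n+1, m => criaPopLoop n (match PySem.List.pop? m 28 with | some (_, r) => r | none => m)

def cria (tipo : String) : List (Int × String) :=
  let monte := (PySem.List.pyRange 1 14 1).foldl
    (fun m valor => ((((m ++ [(valor, "♦")]) ++ [(valor, "♥")]) ++ [(valor, "♠")]) ++ [(valor, "♣")])) []
  let monte := if tipo == "truco" then criaPopLoop 12 monte else monte
  let monte := if tipo == "2macos" then monte ++ monte else monte
  monte

-- ===== PORT B =====
def cria_alt (tipo : String) : List (Int × String) :=
  let skip : PySem.Set Int := if tipo == "truco" then PySem.Set.ofList [8, 9, 10] else PySem.Set.ofList []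
  let monte := ((PySem.List.pyRange 1 14 1).filter (fun valor => !(List.contains skip valor))).flatMap
    (fun valor => [(valor, "♦"), (valor, "♥"), (valor, "♠"), (valor, "♣")])
  if tipo == "2macos" then monte ++ monte else monte

-- ===== PRECONDITION & SPEC =====
def Spec_cria (tipo : String) (out : List (Int × String)) : Prop := out = cria_alt tipo
instance (tipo : String) (out : List (Int × String)) : Decidable (Spec_cria tipo out) := by unfold Spec_cria; infer_instance

-- ===== CLAIM (what is proved, stated in full; the proofs are below) =====
def Claim_equal_cria : Prop := ∀ (tipo : String), Dom_cria tipo → Spec_cria tipo (cria tipo)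

-- ===== LEMMAS AND PROOFS =====

-- ===== VERDICT (by name: the statement is the Claim_ definition above) =====
theorem cria_spec : Claim_equal_cria := by
  intro tipo _
  unfold Spec_cria cria cria_alt
  by_cases h1 : tipo = "truco"
  · subst h1; decide
  · by_cases h2 : tipo = "2macos"
    · subst h2; decide
    · simp only [beq_iff_eq, h1, h2, if_false]
      decide
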